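-- pv_equiv track=rewrite | github.com/julesmuntz/42-piscine-django | d01/ex05/all_in.py | find_state
-- ===== SOURCE A (Python) =====
-- def get_states():
--     return {"Oregon": "OR", "Alabama": "AL", "New Jersey": "NJ", "Colorado": "CO"}
--
-- def get_capital_cities():
--     return {"OR": "Salem", "AL": "Montgomery", "NJ": "Trenton", "CO": "Denver"}
--
-- def to_lowercase_dict(d: dict):
--     return {k.lower(): v.lower() for k, v in d.items()}
--
-- def find_state(capital_city: str):
--     states = get_states()
--     capital_cities = get_capital_cities()
--     capital_cities_lower = to_lowercase_dict(capital_cities)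
--
--     capital_city = capital_city.lower()
--     if capital_city in capital_cities_lower.values():
--         for state, abbreviation in states.items():
--             if capital_cities_lower[abbreviation.lower()] == capital_city:
--                 return state
--     else:
--         return None
-- ===== SOURCE B (Python) =====
-- def find_state(capital_city: str):
--     states = {"Oregon": "OR", "Alabama": "AL", "New Jersey": "NJ", "Colorado": "CO"}
--     capitals = {"OR": "Salem", "AL": "Montgomery", "NJ": "Trenton", "CO": "Denver"}
--     by_capital = {capitals[abbr].lower(): state for state, abbr in states.items()}
--     return by_capital.get(capital_city.lower())
-- ===== Notes on version B (the rewrite author's own statement) =====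
-- stated objective: simpler
-- what changed: B precomputes one inverted dict mapping lowercased capital to state and answers with a single .get, removing A's separate membership test over values and the linear scan with per-item dict lookups.
import Mathlib
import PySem

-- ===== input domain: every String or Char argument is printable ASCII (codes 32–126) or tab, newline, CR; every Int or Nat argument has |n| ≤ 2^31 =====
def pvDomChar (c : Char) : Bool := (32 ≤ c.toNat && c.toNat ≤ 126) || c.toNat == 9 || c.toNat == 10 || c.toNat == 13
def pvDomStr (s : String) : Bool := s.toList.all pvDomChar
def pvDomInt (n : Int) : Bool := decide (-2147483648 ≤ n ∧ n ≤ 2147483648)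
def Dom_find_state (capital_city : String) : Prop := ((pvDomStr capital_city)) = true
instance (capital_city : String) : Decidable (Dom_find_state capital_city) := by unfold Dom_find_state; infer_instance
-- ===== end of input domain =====

-- ===== PORT A =====
-- One honest line: B replaces A's values-membership test plus linear scan with a precomputed inverted dict (simpler).
def pvGetStates : PySem.Dict String String :=
  PySem.Dict.ofList [("Oregon", "OR"), ("Alabama", "AL"), ("New Jersey", "NJ"), ("Colorado", "CO")]

def pvGetCapitalCities : PySem.Dict String String :=
  PySem.Dict.ofList [("OR", "Salem"), ("AL", "Montgomery"), ("NJ", "Trenton"), ("CO", "Denver")]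

def pvToLowercaseDict (d : PySem.Dict String String) : PySem.Dict String String :=
  d.items.foldl (fun acc kv => acc.insert (PySem.Str.lower kv.1) (PySem.Str.lower kv.2)) PySem.Dict.empty

-- the for-loop over states.items(): first state whose capital matches; falling off returns none
def pvFindLoop (lower : PySem.Dict String String) (cap : String) : List (String × String) → Option String
  | [] => none
  | (state, abbreviation) :: rest =>
    if lower.get? (PySem.Str.lower abbreviation) = some cap then some state
    else pvFindLoop lower cap rest

def find_state (capital_city : String) : Option String :=
  let states := pvGetStates
  let capital_cities := pvGetCapitalCities
  let capital_cities_lower := pvToLowercaseDict capital_cities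
  let cap := PySem.Str.lower capital_city
  if cap ∈ capital_cities_lower.values then
    pvFindLoop capital_cities_lower cap states.items
  else
    none

-- ===== PORT B =====
def find_state_alt (capital_city : String) : Option String :=
  let states : PySem.Dict String String :=
    PySem.Dict.ofList [("Oregon", "OR"), ("Alabama", "AL"), ("New Jersey", "NJ"), ("Colorado", "CO")]
  let capitals : PySem.Dict String String :=
    PySem.Dict.ofList [("OR", "Salem"), ("AL", "Montgomery"), ("NJ", "Trenton"), ("CO", "Denver")]
  let by_capital : PySem.Dict String String :=
    states.items.foldl
      (fun acc kv => acc.insert (PySem.Str.lower (capitals.getD kv.2 "")) kv.1)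
      (PySem.Dict.empty : PySem.Dict String String)
  by_capital.get? (PySem.Str.lower capital_city)

-- ===== PRECONDITION & SPEC =====
def Spec_find_state (capital_city : String) (out : Option String) : Prop := out = find_state_alt capital_city
instance (capital_city : String) (out : Option String) : Decidable (Spec_find_state capital_city out) := by unfold Spec_find_state; infer_instance

-- ===== CLAIM (what is proved, stated in full; the proofs are below) =====
def Claim_equal_find_state : Prop := ∀ (capital_city : String), Dom_find_state capital_city → Spec_find_state capital_city (find_state capital_city)

-- ===== LEMMAS AND PROOFS =====

-- helper lemmas: collapse the closed-term dicts to literals, then reason symbolically on lc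
theorem pv_lowerdict_eq :
    pvToLowercaseDict pvGetCapitalCities
      = PySem.Dict.mk [("or", "salem"), ("al", "montgomery"), ("nj", "trenton"), ("co", "denver")] := by
  decide

theorem pv_states_items_eq :
    pvGetStates.items = [("Oregon", "OR"), ("Alabama", "AL"), ("New Jersey", "NJ"), ("Colorado", "CO")] := by
  decide

theorem pv_inverted_eq :
    ((PySem.Dict.ofList ([("Oregon", "OR"), ("Alabama", "AL"), ("New Jersey", "NJ"), ("Colorado", "CO")] : List (String × String))).items.foldl
        (fun (acc : PySem.Dict String String) kv => acc.insert (PySem.Str.lower ((PySem.Dict.ofList ([("OR", "Salem"), ("AL", "Montgomery"), ("NJ", "Trenton"), ("CO", "Denver")] : List (String × String))).getD kv.2 "")) kv.1)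
        (PySem.Dict.empty : PySem.Dict String String))
      = PySem.Dict.mk [("salem", "Oregon"), ("montgomery", "Alabama"), ("trenton", "New Jersey"), ("denver", "Colorado")] := by
  decide

theorem pv_core (lc : String) :
    (if lc ∈ (pvToLowercaseDict pvGetCapitalCities).values then
        pvFindLoop (pvToLowercaseDict pvGetCapitalCities) lc pvGetStates.items
      else none)
    = ((PySem.Dict.ofList ([("Oregon", "OR"), ("Alabama", "AL"), ("New Jersey", "NJ"), ("Colorado", "CO")] : List (String × String))).items.foldl
        (fun (acc : PySem.Dict String String) kv => acc.insert (PySem.Str.lower ((PySem.Dict.ofList ([("OR", "Salem"), ("AL", "Montgomery"), ("NJ", "Trenton"), ("CO", "Denver")] : List (String × String))).getD kv.2 "")) kv.1)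
        (PySem.Dict.empty : PySem.Dict String String)).get? lc := by
  rw [pv_lowerdict_eq, pv_states_items_eq, pv_inverted_eq]
  have e1 : PySem.Str.lower "OR" = "or" := by decide
  have e2 : PySem.Str.lower "AL" = "al" := by decide
  have e3 : PySem.Str.lower "NJ" = "nj" := by decide
  have e4 : PySem.Str.lower "CO" = "co" := by decide
  by_cases h1 : lc = "salem" <;> by_cases h2 : lc = "montgomery" <;>
    by_cases h3 : lc = "trenton" <;> by_cases h4 : lc = "denver" <;>
  simp_all [pvFindLoop, PySem.Dict.get?_mk_cons, PySem.Dict.values, e1, e2, e3, e4]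
  have n1 : ¬("salem" = lc) := fun h => h1 h.symm
  have n2 : ¬("montgomery" = lc) := fun h => h2 h.symm
  have n3 : ¬("trenton" = lc) := fun h => h3 h.symm
  have n4 : ¬("denver" = lc) := fun h => h4 h.symm
  simp [n1, n2, n3, n4, PySem.Dict.get?]

-- ===== VERDICT (by name: the statement is the Claim_ definition above) =====
theorem find_state_spec : Claim_equal_find_state := by
  intro s _
  unfold Spec_find_state find_state find_state_alt
  exact pv_core (PySem.Str.lower s)
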